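-- pv_equiv track=rewrite | github.com/anarvicente/TEP | atividade_1/tarefa_4.py | classifica
-- ===== SOURCE A (Python) =====
-- def classifica(d):
--
--     r = {}
--
--     for methodName in d:
--         r[methodName] = {}
--         reverse = False
--         if methodName in ("Correlation", "Intersection"):
--             reverse = True
--         for onde in d[methodName]:
--             r[methodName][onde] = {}
--
--             #cada classe
--             for item in d[methodName][onde]:
--                 r[methodName][onde][item] = sorted(d[methodName][onde][item], reverse = reverse)[0]
--
--
--     n = {}
--     for method in r:
--         n[method] = {}
--
--         reverse = False
--
--         if method in ("Correlation", "Intersection"):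
--             reverse = True
--
--         l = []
--
--         for onde in r[method]:
--             l = []
--             for k,v in r[method][onde].items():
--                 l.append((v,k))
--
--             n[method][onde] = sorted(l, reverse=reverse)[0]
--
--
--     return n
-- ===== SOURCE B (Python) =====
-- def classifica(d):
--     # No sorting and no scratch table: each extreme is found by a single
--     # linear min/max scan (lexicographic tuple comparison for the pairs).
--     n = {}
--     for method, ondes in d.items():
--         pick = max if method in ("Correlation", "Intersection") else min
--         res = {}
--         for onde, items in ondes.items():
--             res[onde] = pick((pick(vals), item) for item, vals in items.items())
--         n[method] = res
--     return n
-- ===== Notes on version B (the rewrite author's own statement) =====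
-- stated objective: alternative
-- what changed: B replaces A's sort-then-take-first on both levels (and the intermediate scratch dict r that A builds and re-scans) with single running min/max scans: each per-item extreme and each per-onde extreme (value, item) pair is found by one linear pass with lexicographic tuple comparison, and no list is ever sorted.
import Mathlib
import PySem

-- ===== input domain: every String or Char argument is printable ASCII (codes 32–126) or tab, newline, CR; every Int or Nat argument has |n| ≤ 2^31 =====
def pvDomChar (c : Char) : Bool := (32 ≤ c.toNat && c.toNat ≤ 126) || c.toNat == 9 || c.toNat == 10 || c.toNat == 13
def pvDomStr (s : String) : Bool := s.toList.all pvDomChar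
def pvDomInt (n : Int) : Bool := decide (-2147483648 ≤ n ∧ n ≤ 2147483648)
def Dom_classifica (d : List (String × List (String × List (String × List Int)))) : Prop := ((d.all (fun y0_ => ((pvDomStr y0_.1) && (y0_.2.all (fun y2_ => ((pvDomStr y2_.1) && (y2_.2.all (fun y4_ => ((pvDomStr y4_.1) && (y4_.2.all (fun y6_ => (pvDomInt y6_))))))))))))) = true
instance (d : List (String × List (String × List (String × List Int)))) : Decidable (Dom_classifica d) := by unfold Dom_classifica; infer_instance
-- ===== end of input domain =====

-- B replaces A's sort-then-take-first (and A's scratch table r) with single linear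
-- min/max scans; return-value equivalence only.

-- ===== PORT A =====
-- sorted(vals, reverse=reverse)[0]; under Pre_ the list is nonempty, so headD's default is never read
def pvA_leaf (rev : Bool) (vs : List Int) : Int :=
  (PySem.List.sorted vs (fun x => x) rev).headD 0

-- inner loop: for item in d[method][onde]: r[method][onde][item] = sorted(...)[0]
def pvA_od (rev : Bool) (items : List (String × List Int)) : PySem.Dict String Int :=
  items.foldl (fun od t => od.insert t.1 (pvA_leaf rev t.2)) PySem.Dict.empty

-- middle loop: for onde in d[method]: r[method][onde] = {} ; …
def pvA_md (rev : Bool) (ondes : List (String × List (String × List Int))) :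
    PySem.Dict String (PySem.Dict String Int) :=
  ondes.foldl (fun md q => md.insert q.1 (pvA_od rev q.2)) PySem.Dict.empty

-- second phase inner body: l = [(v, k) for k, v in r[method][onde].items()]; sorted(l, reverse)[0]
def pvA_pick (rev : Bool) (od : PySem.Dict String Int) : Int × String :=
  let l : List (Int × String) := od.items.foldl (fun l kv => l ++ [(kv.2, kv.1)]) []
  (PySem.List.sorted2 l (fun x => x.1) (fun x => x.2) rev).headD (0, "")

-- second phase middle loop: for onde in r[method]: n[method][onde] = sorted(l, reverse)[0]
def pvA_nd (rev : Bool) (md : PySem.Dict String (PySem.Dict String Int)) :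
    PySem.Dict String (Int × String) :=
  md.items.foldl (fun nd q => nd.insert q.1 (pvA_pick rev q.2)) PySem.Dict.empty

def classifica (d : List (String × List (String × List (String × List Int)))) :
    List (String × List (String × Int × String)) :=
  let r : PySem.Dict String (PySem.Dict String (PySem.Dict String Int)) :=
    d.foldl (fun r p =>
      r.insert p.1 (pvA_md (p.1 == "Correlation" || p.1 == "Intersection") p.2))
      PySem.Dict.empty
  let n : PySem.Dict String (PySem.Dict String (Int × String)) :=
    r.items.foldl (fun n p =>
      n.insert p.1 (pvA_nd (p.1 == "Correlation" || p.1 == "Intersection") p.2))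
      PySem.Dict.empty
  n.items.map (fun p => (p.1, p.2.items))

-- ===== PORT B =====
-- pick(vals): a single running-extremum scan (Python min/max); under Pre_ the list
-- is nonempty, so getD's default is never read
def pvB_best (rev : Bool) (vs : List Int) : Int :=
  (if rev then PySem.List.max? vs (fun x => x) else PySem.List.min? vs (fun x => x)).getD 0

-- pick over (value, item) pairs: one scan with Python's lexicographic tuple comparison
def pvB_bestPair (rev : Bool) (l : List (Int × String)) : Int × String :=
  (if rev then PySem.List.max2? l (fun x => x.1) (fun x => x.2)
   else PySem.List.min2? l (fun x => x.1) (fun x => x.2)).getD (0, "")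

def classifica_alt (d : List (String × List (String × List (String × List Int)))) :
    List (String × List (String × Int × String)) :=
  d.map (fun p =>
    let rev := p.1 == "Correlation" || p.1 == "Intersection"
    (p.1, p.2.map (fun q =>
      (q.1, pvB_bestPair rev (q.2.map (fun t => (pvB_best rev t.2, t.1)))))))

-- ===== PRECONDITION & SPEC =====
-- Pre_ excludes (a) empty per-item value lists and empty per-onde item dicts, on which
-- A's sorted(...)[0] raises IndexError, and (b) association lists with duplicate keys
-- at any level, which do not represent a Python dict unambiguously (Python collapses
-- duplicates before A ever sees them).
def Pre_classifica (d : List (String × List (String × List (String × List Int)))) : Prop :=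
  (d.map Prod.fst).Nodup ∧
  ∀ p ∈ d, (p.2.map Prod.fst).Nodup ∧
    ∀ q ∈ p.2, (q.2.map Prod.fst).Nodup ∧ q.2 ≠ [] ∧ ∀ t ∈ q.2, t.2 ≠ []
instance (d : List (String × List (String × List (String × List Int)))) : Decidable (Pre_classifica d) := by unfold Pre_classifica; infer_instance

def pvWitness_classifica : (List (String × List (String × List (String × List Int)))) :=
  [("Correlation", [("a", [("x", [1, 2]), ("y", [3])])]), ("m", [("b", [("z", [0, -1])])])]

def Spec_classifica (d : List (String × List (String × List (String × List Int)))) (out : List (String × List (String × Int × String))) : Prop := out = classifica_alt d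
instance (d : List (String × List (String × List (String × List Int)))) (out : List (String × List (String × Int × String))) : Decidable (Spec_classifica d out) := by unfold Spec_classifica; infer_instance

-- ===== CLAIM (what is proved, stated in full; the proofs are below) =====
def Claim_equal_classifica : Prop := ∀ (d : List (String × List (String × List (String × List Int)))), Dom_classifica d → Pre_classifica d → Spec_classifica d (classifica d)

-- ===== LEMMAS AND PROOFS =====

theorem pv_items_empty {k v : Type} [BEq k] : (PySem.Dict.empty : PySem.Dict k v).items = [] := rfl

theorem pv_insertBy_head? {α : Type} (before : α → α → Bool) (x : α) (l : List α) :
    (PySem.List.insertBy before x l).head? =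
      some (match l.head? with
            | none => x
            | some y => if before x y then x else y) := by
  cases l with
  | nil => rfl
  | cons y ys =>
    simp only [PySem.List.insertBy, List.head?]
    split_ifs <;> simp_all

-- the running-extremum step with comparator `before` (Python min/max fold step)
def pvStep {α : Type} (before : α → α → Bool) (acc : Option α) (x : α) : Option α :=
  match acc with
  | none => some x
  | some m => if before x m then some x else some m

theorem pv_head?_foldl_insertBy_aux {α : Type} (before : α → α → Bool) (xs l : List α) :
    (xs.foldl (fun acc x => PySem.List.insertBy before x acc) l).head? =
      xs.foldl (pvStep before) l.head? := by
  induction xs generalizing l with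
  | nil => rfl
  | cons x xs ih =>
    simp only [List.foldl_cons]
    rw [ih, pv_insertBy_head?]
    congr 1
    cases l with
    | nil => rfl
    | cons y ys => cases h : before x y <;> simp [pvStep, h]

-- head of an insertion-sorted list = the running-extremum fold with the same comparator
theorem pv_head?_foldl_insertBy {α : Type} (before : α → α → Bool) (xs : List α) :
    (xs.foldl (fun acc x => PySem.List.insertBy before x acc) []).head? =
      xs.foldl (pvStep before) none :=
  pv_head?_foldl_insertBy_aux before xs []

-- Python's lexicographic < on (int, str) pairs, as sorted2/min2?/max2? compare them
def pvLtIS (a b : Int × String) : Bool :=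
  decide (a.1 < b.1) || !decide (b.1 < a.1) && decide (a.2 < b.2)

theorem pv_min?_eq (vs : List Int) :
    PySem.List.min? vs (fun x => x) =
      vs.foldl (pvStep (fun a b => decide (a < b))) none := by
  unfold PySem.List.min?
  apply PySem.List.foldl_congr_mem
  intro acc x _
  cases acc <;> simp [pvStep]

theorem pv_max?_eq (vs : List Int) :
    PySem.List.max? vs (fun x => x) =
      vs.foldl (pvStep (fun a b => decide (b < a))) none := by
  unfold PySem.List.max?
  apply PySem.List.foldl_congr_mem
  intro acc x _
  cases acc <;> simp [pvStep]

theorem pv_min2?_eq (l : List (Int × String)) :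
    PySem.List.min2? l (fun x => x.1) (fun x => x.2) = l.foldl (pvStep pvLtIS) none := by
  unfold PySem.List.min2?
  apply PySem.List.foldl_congr_mem
  intro acc x _
  cases acc <;> simp [pvStep, pvLtIS]

theorem pv_max2?_eq (l : List (Int × String)) :
    PySem.List.max2? l (fun x => x.1) (fun x => x.2) =
      l.foldl (pvStep (fun a b => pvLtIS b a)) none := by
  unfold PySem.List.max2?
  apply PySem.List.foldl_congr_mem
  intro acc x _
  cases acc <;> simp [pvStep, pvLtIS]

theorem pv_leaf_eq (rev : Bool) (vs : List Int) : pvA_leaf rev vs = pvB_best rev vs := by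
  unfold pvA_leaf pvB_best
  cases rev with
  | false =>
    show (PySem.List.sorted vs (fun x => x) false).headD 0 =
      (PySem.List.min? vs (fun x => x)).getD 0
    rw [List.headD_eq_head?_getD, pv_min?_eq,
      ← pv_head?_foldl_insertBy (fun a b => decide (a < b)) vs]
    rfl
  | true =>
    show (PySem.List.sorted vs (fun x => x) true).headD 0 =
      (PySem.List.max? vs (fun x => x)).getD 0
    rw [List.headD_eq_head?_getD, pv_max?_eq,
      ← pv_head?_foldl_insertBy (fun a b => decide (b < a)) vs]
    rfl

theorem pv_pair_eq (rev : Bool) (l : List (Int × String)) :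
    (PySem.List.sorted2 l (fun x => x.1) (fun x => x.2) rev).headD (0, "") =
      pvB_bestPair rev l := by
  unfold pvB_bestPair
  cases rev with
  | false =>
    show (PySem.List.sorted2 l (fun x => x.1) (fun x => x.2) false).headD (0, "") =
      (PySem.List.min2? l (fun x => x.1) (fun x => x.2)).getD (0, "")
    rw [List.headD_eq_head?_getD, pv_min2?_eq, ← pv_head?_foldl_insertBy pvLtIS l]
    rfl
  | true =>
    show (PySem.List.sorted2 l (fun x => x.1) (fun x => x.2) true).headD (0, "") =
      (PySem.List.max2? l (fun x => x.1) (fun x => x.2)).getD (0, "")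
    rw [List.headD_eq_head?_getD, pv_max2?_eq,
      ← pv_head?_foldl_insertBy (fun a b => pvLtIS b a) l]
    rfl

theorem pvA_od_items (rev : Bool) (items : List (String × List Int))
    (h : (items.map Prod.fst).Nodup) :
    (pvA_od rev items).items = items.map (fun t => (t.1, pvA_leaf rev t.2)) := by
  unfold pvA_od
  rw [PySem.Dict.items_foldl_insert_fresh items Prod.fst (fun t => pvA_leaf rev t.2)
    PySem.Dict.empty (by simp [PySem.Dict.contains_empty]) h]
  simp [pv_items_empty]

theorem pvA_md_items (rev : Bool) (ondes : List (String × List (String × List Int)))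
    (h : (ondes.map Prod.fst).Nodup) :
    (pvA_md rev ondes).items = ondes.map (fun q => (q.1, pvA_od rev q.2)) := by
  unfold pvA_md
  rw [PySem.Dict.items_foldl_insert_fresh ondes Prod.fst (fun q => pvA_od rev q.2)
    PySem.Dict.empty (by simp [PySem.Dict.contains_empty]) h]
  simp [pv_items_empty]

theorem pvA_nd_items (rev : Bool) (md : PySem.Dict String (PySem.Dict String Int))
    (h : (md.items.map Prod.fst).Nodup) :
    (pvA_nd rev md).items = md.items.map (fun q => (q.1, pvA_pick rev q.2)) := by
  unfold pvA_nd
  rw [PySem.Dict.items_foldl_insert_fresh md.items Prod.fst (fun q => pvA_pick rev q.2)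
    PySem.Dict.empty (by simp [PySem.Dict.contains_empty]) h]
  simp [pv_items_empty]

theorem pvA_pick_eq (rev : Bool) (items : List (String × List Int))
    (h : (items.map Prod.fst).Nodup) :
    pvA_pick rev (pvA_od rev items) =
      pvB_bestPair rev (items.map (fun t => (pvB_best rev t.2, t.1))) := by
  unfold pvA_pick
  rw [pvA_od_items rev items h,
    PySem.List.foldl_append_singleton_eq_map (f := fun kv : String × Int => (kv.2, kv.1))]
  simp only [List.nil_append, List.map_map]
  rw [pv_pair_eq]
  exact congrArg _ (List.map_congr_left (fun t _ => by simp [Function.comp, pv_leaf_eq]))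

-- ===== VERDICT (by name: the statement is the Claim_ definition above) =====
theorem classifica_spec : Claim_equal_classifica := by
  intro d _ hpre
  obtain ⟨h1, h2⟩ := hpre
  unfold Spec_classifica classifica classifica_alt
  dsimp only
  rw [PySem.Dict.items_foldl_insert_fresh d Prod.fst
    (fun p => pvA_md (p.1 == "Correlation" || p.1 == "Intersection") p.2)
    PySem.Dict.empty (by simp [PySem.Dict.contains_empty]) h1]
  simp only [pv_items_empty, List.nil_append]
  rw [PySem.Dict.items_foldl_insert_fresh
    (d.map (fun p => (p.1, pvA_md (p.1 == "Correlation" || p.1 == "Intersection") p.2)))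
    Prod.fst
    (fun p => pvA_nd (p.1 == "Correlation" || p.1 == "Intersection") p.2)
    PySem.Dict.empty
    (by simp [PySem.Dict.contains_empty]) (by simpa [List.map_map, Function.comp] using h1)]
  simp only [pv_items_empty, List.nil_append, List.map_map]
  apply List.map_congr_left
  intro p hp
  obtain ⟨hm, hq⟩ := h2 p hp
  simp only [Function.comp]
  refine congrArg (Prod.mk p.1) ?_
  rw [pvA_nd_items _ _ (by rw [pvA_md_items _ _ hm]; simpa [List.map_map, Function.comp] using hm),
    pvA_md_items _ _ hm, List.map_map]
  apply List.map_congr_left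
  intro q hqm
  obtain ⟨hn, _, _⟩ := hq q hqm
  simp only [Function.comp]
  rw [pvA_pick_eq _ _ hn]
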